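-- pv_equiv track=rewrite | github.com/shlee0916/LeetCode_Solutions | Easy/largest_number_after_digit_swaps_by_parity.py | largestInteger
-- ===== SOURCE A (Python) =====
-- def largestInteger(num: int) -> int:
--     odd = []
--     even = []
--     ans = 0
--
--     for ch in str(num):
--         if int(ch) % 2 == 0:
--             even.append(int(ch))
--         else:
--             odd.append(int(ch))
--
--     odd.sort()
--     even.sort()
--
--     for ch in str(num):
--         if int(ch) % 2 == 0:
--             ans = ans * 10 + even.pop()
--         else:
--             ans = ans * 10 + odd.pop()
--
--     return ans
-- ===== SOURCE B (Python) =====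
-- def largestInteger(num: int) -> int:
--     s = str(num)
--     cnt = [0] * 10
--     for ch in s:
--         cnt[int(ch)] += 1
--     ans = 0
--     for ch in s:
--         start = 8 if int(ch) % 2 == 0 else 9
--         for d in range(start, -1, -2):
--             if cnt[d]:
--                 cnt[d] -= 1
--                 ans = ans * 10 + d
--                 break
--     return ans
-- ===== Notes on version B (the rewrite author's own statement) =====
-- stated objective: alternative
-- what changed: Replaces A's sort-two-lists-then-pop-max scheme by a cnt[0..9] frequency table built in one pass, with each position's digit chosen by a descending same-parity scan of the counts (no sorting, no list mutation).
import Mathlib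
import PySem

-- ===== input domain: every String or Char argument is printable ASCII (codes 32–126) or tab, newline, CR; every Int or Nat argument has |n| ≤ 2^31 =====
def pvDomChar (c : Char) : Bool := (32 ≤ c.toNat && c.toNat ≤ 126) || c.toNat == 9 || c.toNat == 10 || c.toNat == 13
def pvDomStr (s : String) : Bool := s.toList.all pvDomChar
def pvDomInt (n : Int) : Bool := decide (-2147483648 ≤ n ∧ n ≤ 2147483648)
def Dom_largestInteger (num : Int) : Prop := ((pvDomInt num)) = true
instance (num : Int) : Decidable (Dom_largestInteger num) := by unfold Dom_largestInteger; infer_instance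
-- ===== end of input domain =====

-- B replaces A's sort-two-lists-and-pop approach by a cnt[0..9] frequency table with a
-- descending same-parity scan per position (objective: alternative; not measurably faster
-- on the bounded domain). Both Pythons raise ValueError on num < 0 (int('-')): Pre_ excludes that.

-- ===== PORT A =====
-- int(ch); total via getD — only reached on digit chars, since num < 0 (where Python hits '-'
-- and raises) is outside Pre_
def pvDigit (c : Char) : Int := (PySem.Int.ofChars? [c]).getD 0
-- int(ch) % 2 == 0
def pvEvenCh (c : Char) : Bool := PySem.Int.mod (pvDigit c) 2 == 0
-- first loop body: append int(ch) to even or odd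
def pvSplit (st : List Int × List Int) (c : Char) : List Int × List Int :=
  if pvEvenCh c then (st.1, st.2 ++ [pvDigit c]) else (st.1 ++ [pvDigit c], st.2)
-- second loop body: ans = ans*10 + (even|odd).pop()  (pop of [] would raise: unreachable under Pre_)
def pvStepA (st : Int × List Int × List Int) (c : Char) : Int × List Int × List Int :=
  if pvEvenCh c then
    match PySem.List.pop? st.2.2 with
    | some (v, rest) => (st.1 * 10 + v, st.2.1, rest)
    | none => st
  else
    match PySem.List.pop? st.2.1 with
    | some (v, rest) => (st.1 * 10 + v, rest, st.2.2)
    | none => st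

def largestInteger (num : Int) : Int :=
  let s := (PySem.Int.toStr num).toList
  let oe := s.foldl pvSplit ([], [])
  let odd := PySem.List.sorted oe.1 (fun x => x) false
  let even := PySem.List.sorted oe.2 (fun x => x) false
  (s.foldl pvStepA (0, odd, even)).1

-- ===== PORT B =====
-- cnt[int(ch)] += 1
def pvCount (cnt : List Int) (c : Char) : List Int :=
  PySem.List.pySetD cnt (pvDigit c) (PySem.List.pyGetD cnt (pvDigit c) 0 + 1)
-- inner 'for d in range(start, -1, -2): if cnt[d]: …; break'
def pvScan (st : Int × List Int) : List Int → Int × List Int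
  | [] => st
  | d :: ds =>
    if PySem.List.pyGetD st.2 d 0 != 0 then
      (st.1 * 10 + d, PySem.List.pySetD st.2 d (PySem.List.pyGetD st.2 d 0 - 1))
    else pvScan st ds
-- second loop body of B
def pvStepB (st : Int × List Int) (c : Char) : Int × List Int :=
  pvScan st (PySem.List.pyRange (if pvEvenCh c then 8 else 9) (-1) (-2))

def largestInteger_alt (num : Int) : Int :=
  let s := (PySem.Int.toStr num).toList
  let cnt := s.foldl pvCount (List.replicate 10 0)
  (s.foldl pvStepB (0, cnt)).1

-- ===== PRECONDITION & SPEC =====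
-- Pre_ excludes num < 0, where str(num) starts with '-' and int('-') raises ValueError in A.
def Pre_largestInteger (num : Int) : Prop := 0 ≤ num
instance (num : Int) : Decidable (Pre_largestInteger num) := by unfold Pre_largestInteger; infer_instance
def pvWitness_largestInteger : Int := 1234

def Spec_largestInteger (num : Int) (out : Int) : Prop := out = largestInteger_alt num
instance (num : Int) (out : Int) : Decidable (Spec_largestInteger num out) := by unfold Spec_largestInteger; infer_instance

-- ===== CLAIM (what is proved, stated in full; the proofs are below) =====
def Claim_equal_largestInteger : Prop := ∀ (num : Int), Dom_largestInteger num → Pre_largestInteger num → Spec_largestInteger num (largestInteger num)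

-- ===== LEMMAS AND PROOFS =====

-- a char is one of '0'..'9'
def pvIsDig (c : Char) : Prop := ∃ k : Nat, k < 10 ∧ c = Nat.digitChar k

-- cnt[k] for a Nat digit k
def pvAt (cnt : List Int) (k : Nat) : Int := PySem.List.pyGetD cnt (k : Int) 0

lemma pvDigit_digitChar {k : Nat} (hk : k < 10) : pvDigit (Nat.digitChar k) = (k : Int) := by
  interval_cases k <;> decide

lemma pvEvenCh_digitChar {k : Nat} (hk : k < 10) :
    pvEvenCh (Nat.digitChar k) = decide (k % 2 = 0) := by
  interval_cases k <;> decide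

lemma toDigitsCore_digits :
    ∀ (fuel n : Nat) (ds : List Char), (∀ c ∈ ds, pvIsDig c) →
      ∀ c ∈ Nat.toDigitsCore 10 fuel n ds, pvIsDig c := by
  intro fuel
  induction fuel with
  | zero => intro n ds hds c hc; exact hds c hc
  | succ fuel ih =>
    intro n ds hds c hc
    have hdig : pvIsDig (Nat.digitChar (n % 10)) :=
      ⟨n % 10, Nat.mod_lt _ (by norm_num), rfl⟩
    simp only [Nat.toDigitsCore] at hc
    by_cases h : n / 10 = 0
    · rw [if_pos h] at hc
      rcases List.mem_cons.mp hc with h' | h'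
      · exact h' ▸ hdig
      · exact hds c h'
    · rw [if_neg h] at hc
      refine ih _ _ ?_ c hc
      intro x hx
      rcases List.mem_cons.mp hx with h' | h'
      · exact h' ▸ hdig
      · exact hds x h'

lemma toChars_digits {n : Int} (hn : 0 ≤ n) : ∀ c ∈ PySem.Int.toChars n, pvIsDig c := by
  intro c hc
  unfold PySem.Int.toChars at hc
  rw [if_neg (by omega)] at hc
  exact toDigitsCore_digits _ _ [] (by simp) c hc

-- first loop of A splits s into the odd and even digits, in order
lemma split_loop (s : List Char) : ∀ a b : List Int,
    s.foldl pvSplit (a, b) =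
      (a ++ (s.filter (fun c => !pvEvenCh c)).map pvDigit,
       b ++ (s.filter pvEvenCh).map pvDigit) := by
  induction s with
  | nil => simp
  | cons c s ih =>
    intro a b
    simp only [List.foldl_cons, pvSplit]
    by_cases h : pvEvenCh c
    · rw [if_pos h, ih]; simp [h]
    · rw [if_neg h, ih]; simp [h]

-- first loop of B counts each digit
lemma count_loop (s : List Char) : ∀ cnt : List Int, cnt.length = 10 →
    (∀ c ∈ s, pvIsDig c) →
    (s.foldl pvCount cnt).length = 10 ∧
    ∀ j : Nat, j < 10 →
      pvAt (s.foldl pvCount cnt) j =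
        pvAt cnt j + (s.countP (fun c => pvDigit c == (j : Int)) : Int) := by
  induction s with
  | nil => intro cnt hlen _; exact ⟨hlen, by simp [pvAt]⟩
  | cons c s ih =>
    intro cnt hlen hdig
    obtain ⟨k, hk, rfl⟩ := hdig c (by simp)
    have hstep : pvCount cnt (Nat.digitChar k) =
        PySem.List.pySetD cnt (k : Int) (pvAt cnt k + 1) := by
      simp [pvCount, pvDigit_digitChar hk, pvAt]
    have hlen' : (pvCount cnt (Nat.digitChar k)).length = 10 := by
      rw [hstep, PySem.List.length_pySetD, hlen]
    obtain ⟨h1, h2⟩ := ih _ hlen' (fun c hc => hdig c (by simp [hc]))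
    refine ⟨by simpa using h1, ?_⟩
    intro j hj
    have := h2 j hj
    simp only [List.foldl_cons] at this ⊢
    rw [this, hstep]
    have hset : pvAt (PySem.List.pySetD cnt (k : Int) (pvAt cnt k + 1)) j =
        if j = k then pvAt cnt k + 1 else pvAt cnt j := by
      simpa [pvAt] using
        PySem.List.pyGetD_pySetD_natCast cnt k j (pvAt cnt k + 1) 0 (by omega)
    rw [hset]
    rw [List.countP_cons]
    by_cases hjk : j = k
    · subst hjk
      have : (pvDigit (Nat.digitChar j) == (j : Int)) = true := by
        simp [pvDigit_digitChar hj]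
      rw [if_pos rfl, this]
      simp; ring
    · have : (pvDigit (Nat.digitChar k) == (j : Int)) = false := by
        simp [pvDigit_digitChar hk]
        omega
      rw [if_neg hjk, this]
      simp

-- the inner scan finds the unique live digit that every larger listed digit misses
lemma scan_finds : ∀ (ds : List Int) (st : Int × List Int) (m : Int),
    m ∈ ds → ds.Pairwise (· > ·) →
    PySem.List.pyGetD st.2 m 0 ≠ 0 →
    (∀ d ∈ ds, m < d → PySem.List.pyGetD st.2 d 0 = 0) →
    pvScan st ds = (st.1 * 10 + m, PySem.List.pySetD st.2 m (PySem.List.pyGetD st.2 m 0 - 1)) := by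
  intro ds
  induction ds with
  | nil => intro st m hm; simp at hm
  | cons d ds ih =>
    intro st m hm hpair hlive hz
    rcases List.mem_cons.mp hm with rfl | hm'
    · simp only [pvScan]
      rw [if_pos (by simpa using hlive)]
    · have hdm : m < d := (List.pairwise_cons.mp hpair).1 m hm'
      have hd0 : PySem.List.pyGetD st.2 d 0 = 0 := hz d (by simp) hdm
      simp only [pvScan]
      rw [if_neg (by simpa using hd0)]
      exact ih st m hm' (List.pairwise_cons.mp hpair).2 hlive
        (fun d' hd' hmd' => hz d' (by simp [hd']) hmd')

-- count of anything above the maximum is zero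
lemma count_zero_of_max {l : List Int} {m d : Int} (hmax : ∀ x ∈ l, x ≤ m) (hmd : m < d) :
    l.count d = 0 := by
  rw [List.count_eq_zero]
  intro hd
  exact absurd (hmax d hd) (by omega)

-- main invariant-carrying induction over the second loops
lemma main_loop : ∀ (t : List Char) (ans : Int) (odd even cnt : List Int),
    (∀ c ∈ t, pvIsDig c) →
    odd.Pairwise (· ≤ ·) → even.Pairwise (· ≤ ·) →
    (∀ x ∈ odd, ∃ k : Nat, k < 10 ∧ k % 2 = 1 ∧ x = (k : Int)) →
    (∀ x ∈ even, ∃ k : Nat, k < 10 ∧ k % 2 = 0 ∧ x = (k : Int)) →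
    cnt.length = 10 →
    (∀ k : Nat, k < 10 →
      pvAt cnt k = ((if k % 2 = 0 then even else odd).count (k : Int) : Int)) →
    odd.length = t.countP (fun c => !pvEvenCh c) →
    even.length = t.countP pvEvenCh →
    (t.foldl pvStepA (ans, odd, even)).1 = (t.foldl pvStepB (ans, cnt)).1 := by
  intro t
  induction t with
  | nil => intro ans odd even cnt _ _ _ _ _ _ _ _ _; rfl
  | cons c t ih =>
    intro ans odd even cnt hdig hso hse hmo hme hlen hcnt hlo hle
    obtain ⟨k, hk, rfl⟩ := hdig c (by simp)
    have hdig' : ∀ c ∈ t, pvIsDig c := fun c hc => hdig c (List.mem_cons_of_mem _ hc)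
    by_cases hpar : k % 2 = 0
    · -- the current digit is even: A pops the max of `even`, B scans 8,6,4,2,0
      have hech : pvEvenCh (Nat.digitChar k) = true := by
        rw [pvEvenCh_digitChar hk]; simp [hpar]
      have hlen1 : even.length = t.countP pvEvenCh + 1 := by
        rw [hle, List.countP_cons, hech]
        simp
      have hne : even ≠ [] := by
        intro h; rw [h] at hlen1; simp at hlen1
      have hsplit : even.dropLast ++ [even.getLast hne] = even :=
        List.dropLast_append_getLast hne
      obtain ⟨km, hkm, hkme, hmk⟩ := hme _ (List.getLast_mem hne)
      have hmax : ∀ x ∈ even, x ≤ even.getLast hne := by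
        intro x hx
        rw [← hsplit] at hx hse
        rcases List.mem_append.mp hx with h | h
        · exact (List.pairwise_append.mp hse).2.2 x h _ (by simp)
        · simp at h; omega
      -- A's step
      have hpop : PySem.List.pop? even = some (even.getLast hne, even.dropLast) := by
        conv_lhs => rw [← hsplit]
        exact PySem.List.pop?_last _ _
      have hA : List.foldl pvStepA (ans, odd, even) (Nat.digitChar k :: t) =
          List.foldl pvStepA (ans * 10 + even.getLast hne, odd, even.dropLast) t := by
        rw [List.foldl_cons]
        congr 1
        show pvStepA (ans, odd, even) (Nat.digitChar k) = _
        simp only [pvStepA, hech, if_true]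
        simp [hpop]
      -- count facts
      have hcm : pvAt cnt km = (even.count ((km : Int)) : Int) := by
        rw [hcnt km hkm, if_pos hkme]
      have hcmne : PySem.List.pyGetD cnt (even.getLast hne) 0 ≠ 0 := by
        rw [hmk]
        show pvAt cnt km ≠ 0
        rw [hcm]
        have : 0 < even.count ((km : Int)) :=
          List.count_pos_iff.mpr (hmk ▸ List.getLast_mem hne)
        omega
      have key : ∀ j : Nat, j < 10 → j % 2 = 0 → even.getLast hne < (j : Int) →
          PySem.List.pyGetD cnt ((j : Nat) : Int) 0 = 0 := by
        intro j hj hjp hmj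
        have h1 := hcnt j hj
        rw [if_pos hjp] at h1
        show pvAt cnt j = 0
        rw [h1, count_zero_of_max hmax hmj]
        rfl
      have hz : ∀ d ∈ ([8, 6, 4, 2, 0] : List Int), even.getLast hne < d →
          PySem.List.pyGetD cnt d 0 = 0 := by
        intro d hd hmd
        fin_cases hd
        · simpa using key 8 (by norm_num) (by norm_num) (by simpa using hmd)
        · simpa using key 6 (by norm_num) (by norm_num) (by simpa using hmd)
        · simpa using key 4 (by norm_num) (by norm_num) (by simpa using hmd)
        · simpa using key 2 (by norm_num) (by norm_num) (by simpa using hmd)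
        · simpa using key 0 (by norm_num) (by norm_num) (by simpa using hmd)
      have hmem : even.getLast hne ∈ ([8, 6, 4, 2, 0] : List Int) := by
        rw [hmk]
        interval_cases km <;> first | (exfalso; omega) | norm_num
      have hB : List.foldl pvStepB (ans, cnt) (Nat.digitChar k :: t) =
          List.foldl pvStepB (ans * 10 + even.getLast hne,
            PySem.List.pySetD cnt (even.getLast hne)
              (PySem.List.pyGetD cnt (even.getLast hne) 0 - 1)) t := by
        rw [List.foldl_cons]
        congr 1
        rw [pvStepB, hech, if_pos rfl,
            show PySem.List.pyRange 8 (-1) (-2) = [8, 6, 4, 2, 0] from by decide]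
        exact scan_finds _ (ans, cnt) _ hmem (by decide) hcmne hz
      rw [hA, hB]
      -- re-establish the invariant and apply the IH
      have hset : ∀ j : Nat, j < 10 →
          pvAt (PySem.List.pySetD cnt (even.getLast hne)
            (PySem.List.pyGetD cnt (even.getLast hne) 0 - 1)) j =
          if j = km then pvAt cnt km - 1 else pvAt cnt j := by
        intro j hj
        rw [hmk]
        show PySem.List.pyGetD (PySem.List.pySetD cnt ((km : Nat) : Int) _) ((j : Nat) : Int) 0 = _
        rw [PySem.List.pyGetD_pySetD_natCast cnt km j _ 0 (by omega)]
        rfl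
      apply ih (ans * 10 + even.getLast hne) odd even.dropLast _ hdig' hso
        (List.Pairwise.sublist (List.dropLast_sublist _) hse) hmo
        (fun x hx => hme x (List.mem_of_mem_dropLast hx))
        (by rw [PySem.List.length_pySetD]; exact hlen)
      · -- counts
        intro j hj
        rw [hset j hj]
        have hcountm : even.count ((km : Int)) = even.dropLast.count ((km : Int)) + 1 := by
          conv_lhs => rw [← hsplit]
          rw [List.count_append, hmk]
          simp
        by_cases hjk : j = km
        · subst hjk
          rw [if_pos rfl, if_pos hkme, hcm, hcountm]
          push_cast; ring
        · rw [if_neg hjk, hcnt j hj]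
          by_cases hjp : j % 2 = 0
          · rw [if_pos hjp, if_pos hjp]
            have hne' : ((km : Int)) ≠ ((j : Int)) := by
              intro h; exact hjk (by exact_mod_cast h.symm)
            have : even.count ((j : Int)) = even.dropLast.count ((j : Int)) := by
              conv_lhs => rw [← hsplit]
              rw [List.count_append, hmk]
              simp [hne']
            rw [this]
          · rw [if_neg hjp, if_neg hjp]
      · -- odd length
        rw [hlo, List.countP_cons, hech]
        simp
      · -- even length
        have : even.dropLast.length = even.length - 1 := by
          rw [List.length_dropLast]
        omega
    · -- the current digit is odd: symmetric
      have hech : pvEvenCh (Nat.digitChar k) = false := by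
        rw [pvEvenCh_digitChar hk]; simp [hpar]
      have hlen1 : odd.length = t.countP (fun c => !pvEvenCh c) + 1 := by
        rw [hlo, List.countP_cons]
        simp [hech]
      have hne : odd ≠ [] := by
        intro h; rw [h] at hlen1; simp at hlen1
      have hsplit : odd.dropLast ++ [odd.getLast hne] = odd :=
        List.dropLast_append_getLast hne
      obtain ⟨km, hkm, hkme, hmk⟩ := hmo _ (List.getLast_mem hne)
      have hmax : ∀ x ∈ odd, x ≤ odd.getLast hne := by
        intro x hx
        rw [← hsplit] at hx hso
        rcases List.mem_append.mp hx with h | h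
        · exact (List.pairwise_append.mp hso).2.2 x h _ (by simp)
        · simp at h; omega
      have hpop : PySem.List.pop? odd = some (odd.getLast hne, odd.dropLast) := by
        conv_lhs => rw [← hsplit]
        exact PySem.List.pop?_last _ _
      have hA : List.foldl pvStepA (ans, odd, even) (Nat.digitChar k :: t) =
          List.foldl pvStepA (ans * 10 + odd.getLast hne, odd.dropLast, even) t := by
        rw [List.foldl_cons]
        congr 1
        show pvStepA (ans, odd, even) (Nat.digitChar k) = _
        simp only [pvStepA, hech, Bool.false_eq_true, if_false]
        simp [hpop]
      have hcm : pvAt cnt km = (odd.count ((km : Int)) : Int) := by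
        rw [hcnt km hkm, if_neg (by omega)]
      have hcmne : PySem.List.pyGetD cnt (odd.getLast hne) 0 ≠ 0 := by
        rw [hmk]
        show pvAt cnt km ≠ 0
        rw [hcm]
        have : 0 < odd.count ((km : Int)) :=
          List.count_pos_iff.mpr (hmk ▸ List.getLast_mem hne)
        omega
      have key : ∀ j : Nat, j < 10 → j % 2 = 1 → odd.getLast hne < (j : Int) →
          PySem.List.pyGetD cnt ((j : Nat) : Int) 0 = 0 := by
        intro j hj hjp hmj
        have h1 := hcnt j hj
        rw [if_neg (by omega)] at h1
        show pvAt cnt j = 0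
        rw [h1, count_zero_of_max hmax hmj]
        rfl
      have hz : ∀ d ∈ ([9, 7, 5, 3, 1] : List Int), odd.getLast hne < d →
          PySem.List.pyGetD cnt d 0 = 0 := by
        intro d hd hmd
        fin_cases hd
        · simpa using key 9 (by norm_num) (by norm_num) (by simpa using hmd)
        · simpa using key 7 (by norm_num) (by norm_num) (by simpa using hmd)
        · simpa using key 5 (by norm_num) (by norm_num) (by simpa using hmd)
        · simpa using key 3 (by norm_num) (by norm_num) (by simpa using hmd)
        · simpa using key 1 (by norm_num) (by norm_num) (by simpa using hmd)
      have hmem : odd.getLast hne ∈ ([9, 7, 5, 3, 1] : List Int) := by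
        rw [hmk]
        interval_cases km <;> first | (exfalso; omega) | norm_num
      have hB : List.foldl pvStepB (ans, cnt) (Nat.digitChar k :: t) =
          List.foldl pvStepB (ans * 10 + odd.getLast hne,
            PySem.List.pySetD cnt (odd.getLast hne)
              (PySem.List.pyGetD cnt (odd.getLast hne) 0 - 1)) t := by
        rw [List.foldl_cons]
        congr 1
        rw [pvStepB, hech]
        rw [if_neg (by simp),
            show PySem.List.pyRange 9 (-1) (-2) = [9, 7, 5, 3, 1] from by decide]
        exact scan_finds _ (ans, cnt) _ hmem (by decide) hcmne hz
      rw [hA, hB]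
      have hset : ∀ j : Nat, j < 10 →
          pvAt (PySem.List.pySetD cnt (odd.getLast hne)
            (PySem.List.pyGetD cnt (odd.getLast hne) 0 - 1)) j =
          if j = km then pvAt cnt km - 1 else pvAt cnt j := by
        intro j hj
        rw [hmk]
        show PySem.List.pyGetD (PySem.List.pySetD cnt ((km : Nat) : Int) _) ((j : Nat) : Int) 0 = _
        rw [PySem.List.pyGetD_pySetD_natCast cnt km j _ 0 (by omega)]
        rfl
      apply ih (ans * 10 + odd.getLast hne) odd.dropLast even _ hdig'
        (List.Pairwise.sublist (List.dropLast_sublist _) hso) hse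
        (fun x hx => hmo x (List.mem_of_mem_dropLast hx)) hme
        (by rw [PySem.List.length_pySetD]; exact hlen)
      · -- counts
        intro j hj
        rw [hset j hj]
        have hcountm : odd.count ((km : Int)) = odd.dropLast.count ((km : Int)) + 1 := by
          conv_lhs => rw [← hsplit]
          rw [List.count_append, hmk]
          simp
        by_cases hjk : j = km
        · subst hjk
          rw [if_pos rfl, if_neg (by omega), hcm, hcountm]
          push_cast; ring
        · rw [if_neg hjk, hcnt j hj]
          by_cases hjp : j % 2 = 0
          · rw [if_pos hjp, if_pos hjp]
          · rw [if_neg hjp, if_neg hjp]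
            have hne' : ((km : Int)) ≠ ((j : Int)) := by
              intro h; exact hjk (by exact_mod_cast h.symm)
            have : odd.count ((j : Int)) = odd.dropLast.count ((j : Int)) := by
              conv_lhs => rw [← hsplit]
              rw [List.count_append, hmk]
              simp [hne']
            rw [this]
      · -- odd length
        have : odd.dropLast.length = odd.length - 1 := by
          rw [List.length_dropLast]
        omega
      · -- even length
        rw [hle, List.countP_cons, hech]
        simp

-- counting a digit in the parity-filtered list equals counting it in the whole string
lemma countP_parity (s : List Char) (hdig : ∀ c ∈ s, pvIsDig c) (k : Nat) (hk : k < 10)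
    (b : Bool) (hb : decide (k % 2 = 0) = b) :
    ((s.filter (fun c => pvEvenCh c == b)).map pvDigit).count ((k : Int)) =
      s.countP (fun c => pvDigit c == (k : Int)) := by
  rw [List.count_eq_countP, List.countP_map, List.countP_filter]
  apply List.countP_congr
  intro c hc
  obtain ⟨k', hk', rfl⟩ := hdig c hc
  simp only [Function.comp_apply, Bool.and_eq_true, beq_iff_eq,
    pvDigit_digitChar hk', pvEvenCh_digitChar hk']
  constructor
  · rintro ⟨h, _⟩; exact h
  · intro h
    refine ⟨h, ?_⟩
    have : k' = k := by exact_mod_cast h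
    subst this
    exact hb

-- ===== VERDICT (by name: the statement is the Claim_ definition above) =====
theorem largestInteger_spec : Claim_equal_largestInteger := by
  intro num _ hpre
  unfold Spec_largestInteger largestInteger largestInteger_alt
  simp only [PySem.Int.toList_toStr]
  have hdig : ∀ c ∈ PySem.Int.toChars num, pvIsDig c := toChars_digits hpre
  set s := PySem.Int.toChars num with hs
  have hsplit : s.foldl pvSplit ([], []) =
      ((s.filter (fun c => !pvEvenCh c)).map pvDigit,
       (s.filter pvEvenCh).map pvDigit) := by
    simpa using split_loop s [] []
  rw [hsplit]
  obtain ⟨hclen, hcval⟩ := count_loop s (List.replicate 10 0) (by simp) hdig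
  have hrep : ∀ j : Nat, j < 10 → pvAt (List.replicate 10 0) j = 0 := by
    intro j hj
    interval_cases j <;> decide
  refine main_loop s 0 _ _ _ hdig ?_ ?_ ?_ ?_ hclen ?_ ?_ ?_
  · simpa using PySem.List.sorted_pairwise ((s.filter (fun c => !pvEvenCh c)).map pvDigit)
      (fun x => x)
  · simpa using PySem.List.sorted_pairwise ((s.filter pvEvenCh).map pvDigit) (fun x => x)
  · intro x hx
    rw [PySem.List.mem_sorted] at hx
    obtain ⟨c, hc, rfl⟩ := List.mem_map.mp hx
    obtain ⟨hcs, hcp⟩ := List.mem_filter.mp hc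
    obtain ⟨k, hk, rfl⟩ := hdig c hcs
    refine ⟨k, hk, ?_, by rw [pvDigit_digitChar hk]⟩
    rw [pvEvenCh_digitChar hk] at hcp
    revert hcp
    by_cases h : k % 2 = 0
    · simp [h]
    · simp [h]; omega
  · intro x hx
    rw [PySem.List.mem_sorted] at hx
    obtain ⟨c, hc, rfl⟩ := List.mem_map.mp hx
    obtain ⟨hcs, hcp⟩ := List.mem_filter.mp hc
    obtain ⟨k, hk, rfl⟩ := hdig c hcs
    refine ⟨k, hk, ?_, by rw [pvDigit_digitChar hk]⟩
    rw [pvEvenCh_digitChar hk] at hcp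
    revert hcp
    by_cases h : k % 2 = 0 <;> simp [h]
  · intro k hk
    rw [hcval k hk, hrep k hk]
    by_cases h : k % 2 = 0
    · rw [if_pos h,
        (PySem.List.sorted_perm ((s.filter pvEvenCh).map pvDigit) (fun x => x) false).count_eq,
        show (s.filter pvEvenCh) = s.filter (fun c => pvEvenCh c == true) by simp,
        countP_parity s hdig k hk true (by simp [h])]
      ring
    · rw [if_neg h,
        (PySem.List.sorted_perm ((s.filter (fun c => !pvEvenCh c)).map pvDigit)
          (fun x => x) false).count_eq,
        show (s.filter (fun c => !pvEvenCh c)) = s.filter (fun c => pvEvenCh c == false) by simp,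
        countP_parity s hdig k hk false (by simp [h])]
      ring
  · rw [PySem.List.length_sorted, List.length_map, ← List.countP_eq_length_filter]
  · rw [PySem.List.length_sorted, List.length_map, ← List.countP_eq_length_filter]
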